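-- pv_equiv track=rewrite | github.com/GeoHaber/ZEN_AI_RAG | zena_mode/vision_engine.py | get_vision_summary
-- ===== SOURCE A (Python) =====
-- from typing import List, Dict, Any
-- from collections import Counter
--
-- def get_vision_summary(detections: List[Dict[str, Any]]) -> str:
--     """
--     Generate a human-readable summary of detected objects.
--     """
--     if not detections:
--         return ""
--
--     counts = Counter([d['label'] for d in detections])
--     summary_parts = []
--     for label, count in counts.items():
--         plural = "s" if count > 1 else ""
--         summary_parts.append(f"{count} {label}{plural}")
--
--     return "Objects detected: " + ", ".join(summary_parts)
-- ===== SOURCE B (Python) =====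
-- def get_vision_summary(detections):
--     if not detections:
--         return ""
--
--     def parts(ls):
--         # recursively peel off the first label's whole group, then recurse on the remainder
--         if not ls:
--             return []
--         head = ls[0]
--         rest = [l for l in ls[1:] if l != head]
--         c = len(ls) - len(rest)
--         suffix = "s" if c > 1 else ""
--         return [f"{c} {head}{suffix}"] + parts(rest)
--
--     labels = [d['label'] for d in detections]
--     return "Objects detected: " + ", ".join(parts(labels))
-- ===== Notes on version B (the rewrite author's own statement) =====
-- stated objective: alternative
-- what changed: Replaces the Counter table plus items loop with a recursive partition: repeatedly take the first label, filter its whole group out of the remainder to get its count from the length drop, and recurse on what is left, so no frequency table or dedup pass exists.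
import Mathlib
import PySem

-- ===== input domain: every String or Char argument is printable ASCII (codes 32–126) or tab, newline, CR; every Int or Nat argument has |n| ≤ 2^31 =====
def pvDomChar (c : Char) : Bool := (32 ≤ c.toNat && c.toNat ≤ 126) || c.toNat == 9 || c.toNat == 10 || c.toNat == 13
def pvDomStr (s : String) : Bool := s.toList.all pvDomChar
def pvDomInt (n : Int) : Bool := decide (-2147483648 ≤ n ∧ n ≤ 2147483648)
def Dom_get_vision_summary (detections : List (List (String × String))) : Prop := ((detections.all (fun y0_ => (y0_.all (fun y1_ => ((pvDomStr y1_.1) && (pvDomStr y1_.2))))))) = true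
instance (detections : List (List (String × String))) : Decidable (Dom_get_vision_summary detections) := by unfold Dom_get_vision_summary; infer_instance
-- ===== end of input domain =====

-- B replaces A's Counter table with a recursive partition: peel off the first label's group (its count is the length drop after filtering it out of the remainder) and recurse on what is left (alternative decomposition, similar cost).

-- ===== PORT A =====
-- A: counts = Counter(labels); parts appended in a for loop over counts.items()
def get_vision_summary (detections : List (List (String × String))) : String :=
  if detections = [] then ""
  else
    let labels := detections.map (fun d => (PySem.Dict.mk d).getD "label" "")
    let counts := PySem.Dict.counter labels
    let parts := counts.items.foldl
      (fun acc p =>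
        let plural := if p.2 > 1 then "s" else ""
        acc ++ [PySem.Int.toStr p.2 ++ " " ++ p.1 ++ plural]) []
    "Objects detected: " ++ PySem.Str.join ", " parts

-- ===== PORT B =====
-- B: recursive helper parts(ls): take the head label, filter its group out of the tail, count = length drop, recurse on the remainder
def pvPartsB : List String → List String
  | [] => []
  | h :: t =>
    let rest := t.filter (fun l => !(l == h))
    let c := (h :: t).length - rest.length
    let suffix := if 1 < c then "s" else ""
    (PySem.Int.toStr (c : Int) ++ " " ++ h ++ suffix) :: pvPartsB rest
termination_by ls => ls.length
decreasing_by
  simp [List.length_unattach]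
  exact le_trans (List.length_filter_le _ _) (by simp)

def get_vision_summary_alt (detections : List (List (String × String))) : String :=
  if detections = [] then ""
  else
    let labels := detections.map (fun d => (PySem.Dict.mk d).getD "label" "")
    "Objects detected: " ++ PySem.Str.join ", " (pvPartsB labels)

-- ===== PRECONDITION & SPEC =====
-- Pre_ excludes exactly the detections containing a dict without the key "label", on which A raises KeyError.
def Pre_get_vision_summary (detections : List (List (String × String))) : Prop :=
  ∀ d ∈ detections, (PySem.Dict.mk d).contains "label" = true
instance (detections : List (List (String × String))) : Decidable (Pre_get_vision_summary detections) := by unfold Pre_get_vision_summary; infer_instance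

def pvWitness_get_vision_summary : (List (List (String × String))) := [[("label", "cat")], [("label", "cat")], [("label", "dog")]]

def Spec_get_vision_summary (detections : List (List (String × String))) (out : String) : Prop := out = get_vision_summary_alt detections
instance (detections : List (List (String × String))) (out : String) : Decidable (Spec_get_vision_summary detections out) := by unfold Spec_get_vision_summary; infer_instance

-- ===== CLAIM (what is proved, stated in full; the proofs are below) =====
def Claim_equal_get_vision_summary : Prop := ∀ (detections : List (List (String × String))), Dom_get_vision_summary detections → Pre_get_vision_summary detections → Spec_get_vision_summary detections (get_vision_summary detections)

-- ===== LEMMAS AND PROOFS =====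

lemma ofList_filter_ne (x : String) (xs : List String) :
    PySem.Set.ofList (xs.filter (fun y => !(y == x)))
      = (PySem.Set.ofList xs).filter (fun y => !(y == x)) := by
  induction xs with
  | nil => simp [PySem.Set.ofList_nil]
  | cons h t ih =>
    rw [PySem.Set.ofList_cons, PySem.Set.discard]
    by_cases hx : h = x
    · subst hx
      simp only [List.filter_cons, beq_self_eq_true, Bool.not_true, Bool.false_eq_true, if_false, ih,
        List.filter_filter]
      rw [List.filter_congr (fun y _ => by simp : ∀ y ∈ PySem.Set.ofList t, ((!(y == h)) && (!(y == h))) = (!(y == h)))]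
    · have hb : (!(h == x)) = true := by simp [hx]
      simp only [List.filter_cons, hb, if_true, PySem.Set.ofList_cons, PySem.Set.discard, ih,
        List.filter_filter]
      congr 1
      exact List.filter_congr (fun y _ => by simp [Bool.and_comm])

lemma pvPartsB_eq_aux : ∀ (n : Nat) (ls : List String), ls.length ≤ n →
    pvPartsB ls = (PySem.Set.ofList ls).map
      (fun k => PySem.Int.toStr ((ls.count k : Nat) : Int) ++ " " ++ k
        ++ (if 1 < ls.count k then "s" else "")) := by
  intro n
  induction n with
  | zero =>
    intro ls hls
    have : ls = [] := List.eq_nil_of_length_eq_zero (Nat.le_zero.mp hls)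
    subst this
    simp [pvPartsB, PySem.Set.ofList_nil]
  | succ n ih =>
    intro ls hls
    match ls with
    | [] => simp [pvPartsB, PySem.Set.ofList_nil]
    | h :: t =>
      rw [pvPartsB.eq_2]
      have hlen : (t.filter (fun l => !(l == h))).length ≤ n := by
        have := List.length_filter_le (fun l => !(l == h)) t
        simp at hls; omega
      rw [ih _ hlen]
      have hcount : (h :: t).length - (t.filter (fun l => !(l == h))).length = (h :: t).count h := by
        have h1 : (t.filter (fun l => !(l == h))).length = t.countP (fun l => !(l == h)) :=
          List.countP_eq_length_filter.symm
        have h2 : t.countP (fun l => !(l == h)) + t.countP (fun l => l == h) = t.length := by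
          rw [Nat.add_comm]
          simpa using (List.length_eq_countP_add_countP (l := t) (p := fun l => l == h)).symm
        have h3 : t.count h = t.countP (fun l => l == h) := rfl
        simp only [List.length_cons, List.count_cons_self]
        omega
      rw [PySem.Set.ofList_cons, PySem.Set.discard, ← ofList_filter_ne, List.map_cons, hcount]
      congr 1
      apply List.map_congr_left
      intro k hk
      have hkne : k ≠ h := by
        have hm : k ∈ t.filter (fun l => !(l == h)) := by
          simpa [PySem.Set.mem_ofList] using hk
        have := List.of_mem_filter hm
        simpa using this
      have hc : (t.filter (fun l => !(l == h))).count k = (h :: t).count k := by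
        rw [List.count_filter (by simpa using hkne)]
        simp [Ne.symm hkne]
      rw [hc]

-- ===== VERDICT (by name: the statement is the Claim_ definition above) =====
theorem get_vision_summary_spec : Claim_equal_get_vision_summary := by
  intro detections _ _
  unfold Spec_get_vision_summary get_vision_summary get_vision_summary_alt
  by_cases h : detections = []
  · simp [h]
  · simp only [h, ite_false]
    refine congrArg _ (congrArg _ ?_)
    rw [pvPartsB_eq_aux _ _ (le_refl _), PySem.List.foldl_append_singleton_eq_map,
      PySem.Dict.items_counter, List.map_map, List.nil_append]
    apply List.map_congr_left
    intro l _
    simp [Nat.one_lt_cast]
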